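-- pv_equiv track=rewrite | github.com/UPCodersEEBE/AdventOfCode | 2021/Dia05/Toti/day5.py | FindNoRowsAndCols
-- ===== SOURCE A (Python) =====
-- def FindNoRowsAndCols(lines):
--     r = 0
--     c = 0
--     for i in lines:
--         if i[0] == 'v':
--             if i[1] > c:
--                 c = i[1]
--             if i[2] > r:
--                 r = i[2]
--             if i[3] > r:
--                 r = i[3]
--         if i[0] == 'h':
--             if i[1] > r:
--                 r = i[1]
--             if i[2] > c:
--                 c = i[2]
--             if i[3] > c:
--                 c = i[3]
--     return(r,c)
-- ===== SOURCE B (Python) =====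
-- def FindNoRowsAndCols(lines):
--     # divide and conquer: solve halves independently, combine with max
--     if not lines:
--         return (0, 0)
--     if len(lines) == 1:
--         tag, a, b, c = lines[0]
--         if tag == 'v':
--             return (max(b, c, 0), max(a, 0))
--         if tag == 'h':
--             return (max(a, 0), max(b, c, 0))
--         return (0, 0)
--     mid = len(lines) // 2
--     r1, c1 = FindNoRowsAndCols(lines[:mid])
--     r2, c2 = FindNoRowsAndCols(lines[mid:])
--     return (max(r1, r2), max(c1, c2))
-- ===== Notes on version B (the rewrite author's own statement) =====
-- stated objective: alternative
-- what changed: Replaces the single left-to-right pass with running maxima by a divide-and-conquer recursion: split the list in half, solve each half independently (single lines map to their 0-clamped candidate maxima), and merge the two sub-results with max; correct because max is associative and commutative with the 0 seed as identity for the nonneg results.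
import Mathlib
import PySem

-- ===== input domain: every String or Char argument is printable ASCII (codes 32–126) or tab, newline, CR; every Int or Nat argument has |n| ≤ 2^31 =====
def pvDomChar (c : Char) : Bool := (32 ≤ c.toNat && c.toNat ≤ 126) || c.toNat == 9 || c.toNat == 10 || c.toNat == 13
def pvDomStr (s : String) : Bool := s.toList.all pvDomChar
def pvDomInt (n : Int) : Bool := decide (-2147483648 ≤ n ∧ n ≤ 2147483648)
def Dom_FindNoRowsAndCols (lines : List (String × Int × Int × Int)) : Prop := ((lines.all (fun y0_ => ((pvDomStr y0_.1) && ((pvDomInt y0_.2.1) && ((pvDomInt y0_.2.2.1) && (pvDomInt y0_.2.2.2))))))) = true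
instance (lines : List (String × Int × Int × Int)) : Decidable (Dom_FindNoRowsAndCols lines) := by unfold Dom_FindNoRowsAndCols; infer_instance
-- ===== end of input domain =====

-- B replaces A's single running-maxima pass by divide-and-conquer (split, solve halves, merge with max); alternative decomposition, same result.

-- ===== PORT A =====
-- one loop iteration of A: running maxima updated by strict-> comparisons
def pvStepA (s : Int × Int) (i : String × Int × Int × Int) : Int × Int :=
  let r := s.1
  let c := s.2
  let (r, c) :=
    if i.1 = "v" then
      let c := if i.2.1 > c then i.2.1 else c
      let r := if i.2.2.1 > r then i.2.2.1 else r
      let r := if i.2.2.2 > r then i.2.2.2 else r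
      (r, c)
    else (r, c)
  if i.1 = "h" then
    let r := if i.2.1 > r then i.2.1 else r
    let c := if i.2.2.1 > c then i.2.2.1 else c
    let c := if i.2.2.2 > c then i.2.2.2 else c
    (r, c)
  else (r, c)

def FindNoRowsAndCols (lines : List (String × Int × Int × Int)) : Int × Int :=
  lines.foldl pvStepA (0, 0)

-- ===== PORT B =====
-- divide and conquer on the list (Python's lines[:mid] / lines[mid:] become take / drop)
def FindNoRowsAndCols_alt (lines : List (String × Int × Int × Int)) : Int × Int :=
  match lines with
  | [] => (0, 0)
  | [i] =>
      if i.1 = "v" then (max (max i.2.2.1 i.2.2.2) 0, max i.2.1 0)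
      else if i.1 = "h" then (max i.2.1 0, max (max i.2.2.1 i.2.2.2) 0)
      else (0, 0)
  | x :: y :: rest =>
      let xs := x :: y :: rest
      let mid := xs.length / 2
      let p := FindNoRowsAndCols_alt (xs.take mid)
      let q := FindNoRowsAndCols_alt (xs.drop mid)
      (max p.1 q.1, max p.2 q.2)
termination_by lines.length
decreasing_by
  · simp [List.length_take]; omega
  · simp [List.length_drop]; omega

-- ===== PRECONDITION & SPEC =====
def Spec_FindNoRowsAndCols (lines : List (String × Int × Int × Int)) (out : Int × Int) : Prop := out = FindNoRowsAndCols_alt lines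
instance (lines : List (String × Int × Int × Int)) (out : Int × Int) : Decidable (Spec_FindNoRowsAndCols lines out) := by unfold Spec_FindNoRowsAndCols; infer_instance

-- ===== CLAIM (what is proved, stated in full; the proofs are below) =====
def Claim_equal_FindNoRowsAndCols : Prop := ∀ (lines : List (String × Int × Int × Int)), Dom_FindNoRowsAndCols lines → Spec_FindNoRowsAndCols lines (FindNoRowsAndCols lines)

-- ===== LEMMAS AND PROOFS =====

set_option maxHeartbeats 1000000

-- unfolding equations for the well-founded recursive FindNoRowsAndCols_alt
theorem pv_alt_nil : FindNoRowsAndCols_alt [] = (0, 0) := by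
  rw [FindNoRowsAndCols_alt]

theorem pv_alt_single (i : String × Int × Int × Int) :
    FindNoRowsAndCols_alt [i] =
      (if i.1 = "v" then (max (max i.2.2.1 i.2.2.2) 0, max i.2.1 0)
       else if i.1 = "h" then (max i.2.1 0, max (max i.2.2.1 i.2.2.2) 0)
       else (0, 0)) := by
  rw [FindNoRowsAndCols_alt]

theorem pv_alt_cons2 (x y : String × Int × Int × Int) (rest : List (String × Int × Int × Int)) :
    FindNoRowsAndCols_alt (x :: y :: rest) =
      (max (FindNoRowsAndCols_alt ((x :: y :: rest).take ((x :: y :: rest).length / 2))).1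
           (FindNoRowsAndCols_alt ((x :: y :: rest).drop ((x :: y :: rest).length / 2))).1,
       max (FindNoRowsAndCols_alt ((x :: y :: rest).take ((x :: y :: rest).length / 2))).2
           (FindNoRowsAndCols_alt ((x :: y :: rest).drop ((x :: y :: rest).length / 2))).2) := by
  rw [FindNoRowsAndCols_alt]

-- both components of B's result are nonnegative (everything is clamped with max … 0)
theorem pv_alt_nonneg (n : Nat) (lines : List (String × Int × Int × Int)) (hn : lines.length ≤ n) :
    0 ≤ (FindNoRowsAndCols_alt lines).1 ∧ 0 ≤ (FindNoRowsAndCols_alt lines).2 := by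
  induction n generalizing lines with
  | zero =>
    have : lines = [] := List.eq_nil_of_length_eq_zero (Nat.le_zero.mp hn)
    subst this; rw [pv_alt_nil]; exact ⟨le_rfl, le_rfl⟩
  | succ n ih =>
    match lines with
    | [] => rw [pv_alt_nil]; exact ⟨le_rfl, le_rfl⟩
    | [i] =>
      rw [pv_alt_single]
      split_ifs <;> constructor <;> simp
    | x :: y :: rest =>
      rw [pv_alt_cons2]
      have h1 := ih ((x :: y :: rest).take ((x :: y :: rest).length / 2))
        (by simp [List.length_take, List.length_cons] at hn ⊢; omega)
      constructor
      · exact le_max_of_le_left h1.1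
      · exact le_max_of_le_left h1.2

-- key invariant: from any nonnegative running state, A's left fold equals the state merged (by max) with B's divide-and-conquer result
theorem pv_key (n : Nat) (lines : List (String × Int × Int × Int)) (hn : lines.length ≤ n) :
    ∀ (r c : Int), 0 ≤ r → 0 ≤ c →
      lines.foldl pvStepA (r, c) =
        (max r (FindNoRowsAndCols_alt lines).1, max c (FindNoRowsAndCols_alt lines).2) := by
  induction n generalizing lines with
  | zero =>
    intro r c hr hc
    have : lines = [] := List.eq_nil_of_length_eq_zero (Nat.le_zero.mp hn)
    subst this
    rw [pv_alt_nil]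
    simp only [List.foldl_nil, Prod.mk.injEq]
    constructor <;> omega
  | succ n ih =>
    intro r c hr hc
    match lines with
    | [] =>
      rw [pv_alt_nil]
      simp only [List.foldl_nil, Prod.mk.injEq]
      constructor <;> omega
    | [i] =>
      rw [pv_alt_single]
      simp only [List.foldl_cons, List.foldl_nil]
      by_cases hv : i.1 = "v"
      · have hh : ¬ i.1 = "h" := by rw [hv]; decide
        simp [pvStepA, hv, Prod.ext_iff]
        constructor <;> (simp only [max_def]; split_ifs <;> omega)
      · by_cases hh : i.1 = "h"
        · simp [pvStepA, hh, Prod.ext_iff]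
          constructor <;> (simp only [max_def]; split_ifs <;> omega)
        · simp [pvStepA, hv, hh, Prod.ext_iff]
          constructor <;> omega
    | x :: y :: rest =>
      rw [pv_alt_cons2]
      have hlen : 2 ≤ (x :: y :: rest).length := by simp
      have hlt : ((x :: y :: rest).take ((x :: y :: rest).length / 2)).length ≤ n := by
        simp [List.length_take, List.length_cons] at hn ⊢; omega
      have hld : ((x :: y :: rest).drop ((x :: y :: rest).length / 2)).length ≤ n := by
        simp [List.length_drop, List.length_cons] at hn ⊢; omega
      have hsplit : (x :: y :: rest) =
          (x :: y :: rest).take ((x :: y :: rest).length / 2) ++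
          (x :: y :: rest).drop ((x :: y :: rest).length / 2) :=
        (List.take_append_drop _ _).symm
      conv_lhs => rw [hsplit]
      rw [List.foldl_append]
      rw [ih _ hlt r c hr hc]
      have hnn := pv_alt_nonneg n _ hlt
      rw [ih _ hld _ _ (le_trans hr (le_max_left r _)) (le_trans hc (le_max_left c _))]
      simp only [Prod.mk.injEq, max_def]
      constructor <;> (split_ifs <;> omega)

-- ===== VERDICT (by name: the statement is the Claim_ definition above) =====
theorem FindNoRowsAndCols_spec : Claim_equal_FindNoRowsAndCols := by
  intro lines _
  unfold Spec_FindNoRowsAndCols FindNoRowsAndCols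
  rw [pv_key lines.length lines le_rfl 0 0 le_rfl le_rfl]
  have h := pv_alt_nonneg lines.length lines le_rfl
  rw [max_eq_right h.1, max_eq_right h.2]
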